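-- pv_equiv track=rewrite | github.com/gusmann/ansible-nessus-agent | library/tenable_product.py | is_equivalent_distro
-- ===== SOURCE A (Python) =====
-- def is_equivalent_distro(distro1, major_version, distro2):
--   """Checks if two Linux distributions are equivalent based on a provided mapping.
--
--   Args:
--       distro1: First distribution string (case-insensitive).
--       distro2: Second distribution string (case-insensitive).
--
--   Returns:
--       True if the distributions are considered equivalent, False otherwise.
--   """
--   distro1_lower = distro1.lower()
--   distro2_lower = distro2.lower()
--
--   equivalences = {
--       "el": ["redhat", "rhel", "fedora", "centos", "scientific", "slc",
--              "ascendos", "cloudlinux", "psbm", "oraclelinux", "ovs",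
--              "oel", "virtuozzo", "xenserver", "alibaba",
--              "euleros", "openEuler", "almalinux", "rocky", "tencentos",
--              "eurolinux", "kylin linux advanced server", "miracle", "el"],
--       "amzn": ["amazon", "amzn",],
--       "ubuntu": ["ubuntu", "raspbian", "neon", "kde neon",
--                  "linux mint", "steamOS", "cumulus linux",
--                  "pop!_os", "parrot", "pardus gnu/linux", "uos", "deepin", "osmc"],
--       "debian": ["debian", "devuan", "kali",],
--       "suse": ["suse", "sles", "sled", "opensuse", "opensuse tumbleweed",
--                "sles_sap", "suse_linux", "opensuse leap", "alp-dolomite"],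
--   }
--
--   # Check if both distributions belong to the same equivalence group
--   for group, aliases in equivalences.items():
--     if distro1_lower in aliases:
--       if distro2_lower.startswith(group):
--           if distro2_lower.startswith('el'):
--             if major_version in distro2_lower:
--               return True
--             else:
--               return False
--           return True
--
--
--   # Not equivalent if no match found
--   return False
-- ===== SOURCE B (Python) =====
-- # B: loop-free dispatch keyed on distro2's FIRST character.  The five group
-- # names ("el","amzn","ubuntu","debian","suse") start with pairwise-distinct
-- # letters, so at most one group name can be a prefix of distro2: pick that one
-- # candidate group directly from distro2[:1] via a dispatch table, verify the
-- # full prefix, and only then test distro1's membership in that group's aliases.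
-- _ALIASES = {
--     "el": ["redhat", "rhel", "fedora", "centos", "scientific", "slc",
--            "ascendos", "cloudlinux", "psbm", "oraclelinux", "ovs",
--            "oel", "virtuozzo", "xenserver", "alibaba",
--            "euleros", "openEuler", "almalinux", "rocky", "tencentos",
--            "eurolinux", "kylin linux advanced server", "miracle", "el"],
--     "amzn": ["amazon", "amzn"],
--     "ubuntu": ["ubuntu", "raspbian", "neon", "kde neon",
--                "linux mint", "steamOS", "cumulus linux",
--                "pop!_os", "parrot", "pardus gnu/linux", "uos", "deepin", "osmc"],
--     "debian": ["debian", "devuan", "kali"],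
--     "suse": ["suse", "sles", "sled", "opensuse", "opensuse tumbleweed",
--              "sles_sap", "suse_linux", "opensuse leap", "alp-dolomite"],
-- }
--
-- # first letter of a group name -> the only group name that could prefix distro2
-- _FIRST_TO_GROUP = {g[:1]: g for g in _ALIASES}
--
--
-- def is_equivalent_distro(distro1, major_version, distro2):
--     d1 = distro1.lower()
--     d2 = distro2.lower()
--     group = _FIRST_TO_GROUP.get(d2[:1])
--     if group is None or not d2.startswith(group):
--         return False
--     if d1 not in _ALIASES[group]:
--         return False
--     return major_version in d2 if group == "el" else True
-- ===== Notes on version B (the rewrite author's own statement) =====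
-- stated objective: alternative
-- what changed: B is driven by distro2 instead of distro1: it is loop-free, dispatching on distro2's first character (the five group names start with pairwise-distinct letters, so at most one can be a prefix) to pick the single candidate group, then verifies the full prefix and finally tests distro1's membership in that group's aliases; A instead scans all five groups driven by distro1-membership.
import Mathlib
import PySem

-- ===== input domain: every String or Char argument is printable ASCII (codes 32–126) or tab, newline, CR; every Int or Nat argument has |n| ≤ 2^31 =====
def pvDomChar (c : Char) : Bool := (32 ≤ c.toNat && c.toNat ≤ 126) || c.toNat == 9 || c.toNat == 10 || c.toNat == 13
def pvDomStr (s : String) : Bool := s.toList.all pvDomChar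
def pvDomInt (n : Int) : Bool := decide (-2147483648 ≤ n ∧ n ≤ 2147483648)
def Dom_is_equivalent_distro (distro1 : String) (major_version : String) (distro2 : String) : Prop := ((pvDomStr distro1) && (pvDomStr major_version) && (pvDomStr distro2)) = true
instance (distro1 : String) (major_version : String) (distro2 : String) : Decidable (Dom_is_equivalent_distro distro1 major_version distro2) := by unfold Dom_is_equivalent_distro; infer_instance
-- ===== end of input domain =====

-- B replaces A's scan over the five groups (driven by distro1-membership) with a loop-free
-- dispatch on distro2's first character to the unique candidate group (objective: alternative).

-- ===== PORT A =====
-- the equivalences table (shared literal data: Source B re-declares the same lists in _ALIASES)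
def pvElAliases : List String := ["redhat", "rhel", "fedora", "centos", "scientific", "slc",
  "ascendos", "cloudlinux", "psbm", "oraclelinux", "ovs",
  "oel", "virtuozzo", "xenserver", "alibaba",
  "euleros", "openEuler", "almalinux", "rocky", "tencentos",
  "eurolinux", "kylin linux advanced server", "miracle", "el"]
def pvAmznAliases : List String := ["amazon", "amzn"]
def pvUbuntuAliases : List String := ["ubuntu", "raspbian", "neon", "kde neon",
  "linux mint", "steamOS", "cumulus linux",
  "pop!_os", "parrot", "pardus gnu/linux", "uos", "deepin", "osmc"]
def pvDebianAliases : List String := ["debian", "devuan", "kali"]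
def pvSuseAliases : List String := ["suse", "sles", "sled", "opensuse", "opensuse tumbleweed",
  "sles_sap", "suse_linux", "opensuse leap", "alp-dolomite"]
def pvEquivalences : List (String × List String) :=
  [("el", pvElAliases), ("amzn", pvAmznAliases), ("ubuntu", pvUbuntuAliases),
   ("debian", pvDebianAliases), ("suse", pvSuseAliases)]

-- the 'for group, aliases in equivalences.items()' loop with its early returns
def pvLoopA (d1 mv d2 : String) : List (String × List String) → Bool
  | [] => false
  | (group, aliases) :: rest =>
    if aliases.contains d1 then
      if PySem.Str.startswith d2 group then
        if PySem.Str.startswith d2 "el" then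
          if PySem.Str.isIn mv d2 then true else false
        else true
      else pvLoopA d1 mv d2 rest
    else pvLoopA d1 mv d2 rest

def is_equivalent_distro (distro1 : String) (major_version : String) (distro2 : String) : Bool :=
  pvLoopA (PySem.Str.lower distro1) major_version (PySem.Str.lower distro2) pvEquivalences

-- ===== PORT B =====
-- _ALIASES as a dict (same literal lists as above)
def pvAliasesB : PySem.Dict String (List String) := PySem.Dict.ofList pvEquivalences
-- _FIRST_TO_GROUP = {g[:1]: g for g in _ALIASES}
def pvFirstToGroup : PySem.Dict String String :=
  pvAliasesB.keys.foldl (fun d g => d.insert (PySem.Str.slice g none (some 1)) g) PySem.Dict.empty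

-- the body of Source B's function, with the two lowered locals d1, d2 as parameters
def pvBodyB (d1 mv d2 : String) : Bool :=
  match pvFirstToGroup.get? (PySem.Str.slice d2 none (some 1)) with
  | none => false
  | some group =>
    if !(PySem.Str.startswith d2 group) then false
    -- _ALIASES[group]: group always comes from the table, so the KeyError branch is dead; getD
    else if !((pvAliasesB.getD group []).contains d1) then false
    else if group == "el" then PySem.Str.isIn mv d2 else true

def is_equivalent_distro_alt (distro1 : String) (major_version : String) (distro2 : String) : Bool :=
  pvBodyB (PySem.Str.lower distro1) major_version (PySem.Str.lower distro2)

-- ===== PRECONDITION & SPEC =====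
def Spec_is_equivalent_distro (distro1 : String) (major_version : String) (distro2 : String) (out : Bool) : Prop := out = is_equivalent_distro_alt distro1 major_version distro2
instance (distro1 : String) (major_version : String) (distro2 : String) (out : Bool) : Decidable (Spec_is_equivalent_distro distro1 major_version distro2 out) := by unfold Spec_is_equivalent_distro; infer_instance

-- ===== CLAIM =====
def Claim_equal_is_equivalent_distro : Prop := ∀ (distro1 : String) (major_version : String) (distro2 : String), Dom_is_equivalent_distro distro1 major_version distro2 → Spec_is_equivalent_distro distro1 major_version distro2 (is_equivalent_distro distro1 major_version distro2)

-- ===== LEMMAS AND PROOFS =====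

-- the dispatch table computes to a literal dict
set_option maxRecDepth 8192 in
lemma pvFirstToGroup_eq :
    pvFirstToGroup = PySem.Dict.mk
      [("e", "el"), ("a", "amzn"), ("u", "ubuntu"), ("d", "debian"), ("s", "suse")] := by
  rfl

-- the five closed lookups _ALIASES[group]
lemma pv_getD_el : pvAliasesB.getD "el" [] = pvElAliases := by rfl
lemma pv_getD_amzn : pvAliasesB.getD "amzn" [] = pvAmznAliases := by rfl
lemma pv_getD_ubuntu : pvAliasesB.getD "ubuntu" [] = pvUbuntuAliases := by rfl
lemma pv_getD_debian : pvAliasesB.getD "debian" [] = pvDebianAliases := by rfl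
lemma pv_getD_suse : pvAliasesB.getD "suse" [] = pvSuseAliases := by rfl

-- the slice d2[:1] on the list side
lemma pv_slice1_toList (s : String) :
    (PySem.Str.slice s none (some 1)).toList = s.toList.take 1 := by
  rw [PySem.Str.toList_slice, PySem.Chars.slice_eq_listSlice,
      PySem.List.slice_to s.toList (by norm_num)]
  rfl

-- startswith needs a matching first character
lemma pv_sw_false_of_head {c g : Char} (p l : List Char) (hne : c ≠ g)
    (ht : l.take 1 = [c]) : PySem.Chars.startswith l (g :: p) = false := by
  rw [Bool.eq_false_iff]
  intro h
  rw [PySem.Chars.startswith_iff] at h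
  obtain ⟨t, ht'⟩ := h
  rw [← ht'] at ht
  simp at ht
  exact hne ht.symm

lemma pv_sw_nil (g : Char) (p : List Char) :
    PySem.Chars.startswith ([] : List Char) (g :: p) = false := by
  rw [Bool.eq_false_iff]
  intro h
  rw [PySem.Chars.startswith_iff] at h
  simp at h

-- a one-char dispatch key matches a literal key only on equal characters
lemma pv_key_ne (k : String) (c : Char) (h : k.toList ≠ [c]) :
    (k == String.ofList [c]) = false := by
  rw [beq_eq_false_iff_ne]
  intro hh
  exact h (by rw [hh]; simp)

lemma pv_get_nil (k : String) :
    (PySem.Dict.mk ([] : List (String × String))).get? k = none := by rfl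

-- ===== VERDICT =====
set_option maxRecDepth 8192 in
theorem is_equivalent_distro_spec : Claim_equal_is_equivalent_distro := by
  intro distro1 mv distro2 _
  unfold Spec_is_equivalent_distro is_equivalent_distro is_equivalent_distro_alt
  generalize PySem.Str.lower distro1 = d1
  generalize PySem.Str.lower distro2 = d2
  rcases ht : d2.toList.take 1 with _ | ⟨c, t0⟩
  · -- d2 is empty: no group name can prefix it, and the dispatch key "" misses
    have hnil : d2.toList = [] := by cases h : d2.toList <;> simp [h] at ht ⊢
    have hkey : PySem.Str.slice d2 none (some 1) = "" :=
      String.toList_inj.mp (by rw [pv_slice1_toList, hnil]; simp)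
    have hnone : (PySem.Dict.mk
        [("e", "el"), ("a", "amzn"), ("u", "ubuntu"), ("d", "debian"), ("s", "suse")]).get? "" = none := by rfl
    have hA : pvLoopA d1 mv d2 pvEquivalences = false := by
      simp [pvLoopA, pvEquivalences, hnil, pv_sw_nil]
    have hB : pvBodyB d1 mv d2 = false := by
      simp [pvBodyB, pvFirstToGroup_eq, hkey, hnone]
    rw [hA, hB]
  · have ht1 : d2.toList.take 1 = [c] := by
      cases h : d2.toList <;> rw [h] at ht <;> simp_all
    by_cases he : c = 'e'
    · subst he
      have hkey : PySem.Str.slice d2 none (some 1) = "e" :=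
        String.toList_inj.mp (by rw [pv_slice1_toList, ht1]; simp)
      have s2 : PySem.Chars.startswith d2.toList ['a','m','z','n'] = false :=
        pv_sw_false_of_head _ _ (by decide) ht1
      have s3 : PySem.Chars.startswith d2.toList ['u','b','u','n','t','u'] = false :=
        pv_sw_false_of_head _ _ (by decide) ht1
      have s4 : PySem.Chars.startswith d2.toList ['d','e','b','i','a','n'] = false :=
        pv_sw_false_of_head _ _ (by decide) ht1
      have s5 : PySem.Chars.startswith d2.toList ['s','u','s','e'] = false :=
        pv_sw_false_of_head _ _ (by decide) ht1
      by_cases hs : PySem.Chars.startswith d2.toList ['e','l'] = true <;>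
        simp [pvBodyB, pvLoopA, pvEquivalences, pvFirstToGroup_eq, hkey, hs,
              s2, s3, s4, s5, pv_getD_el, PySem.Dict.get?_mk_cons]
    · by_cases ha : c = 'a'
      · subst ha
        have hkey : PySem.Str.slice d2 none (some 1) = "a" :=
          String.toList_inj.mp (by rw [pv_slice1_toList, ht1]; simp)
        have s1 : PySem.Chars.startswith d2.toList ['e','l'] = false :=
          pv_sw_false_of_head _ _ (by decide) ht1
        have s3 : PySem.Chars.startswith d2.toList ['u','b','u','n','t','u'] = false :=
          pv_sw_false_of_head _ _ (by decide) ht1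
        have s4 : PySem.Chars.startswith d2.toList ['d','e','b','i','a','n'] = false :=
          pv_sw_false_of_head _ _ (by decide) ht1
        have s5 : PySem.Chars.startswith d2.toList ['s','u','s','e'] = false :=
          pv_sw_false_of_head _ _ (by decide) ht1
        by_cases hs : PySem.Chars.startswith d2.toList ['a','m','z','n'] = true <;>
          simp [pvBodyB, pvLoopA, pvEquivalences, pvFirstToGroup_eq, hkey, hs,
                s1, s3, s4, s5, pv_getD_amzn, PySem.Dict.get?_mk_cons]
      · by_cases hu : c = 'u'
        · subst hu
          have hkey : PySem.Str.slice d2 none (some 1) = "u" :=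
            String.toList_inj.mp (by rw [pv_slice1_toList, ht1]; simp)
          have s1 : PySem.Chars.startswith d2.toList ['e','l'] = false :=
            pv_sw_false_of_head _ _ (by decide) ht1
          have s2 : PySem.Chars.startswith d2.toList ['a','m','z','n'] = false :=
            pv_sw_false_of_head _ _ (by decide) ht1
          have s4 : PySem.Chars.startswith d2.toList ['d','e','b','i','a','n'] = false :=
            pv_sw_false_of_head _ _ (by decide) ht1
          have s5 : PySem.Chars.startswith d2.toList ['s','u','s','e'] = false :=
            pv_sw_false_of_head _ _ (by decide) ht1
          by_cases hs : PySem.Chars.startswith d2.toList ['u','b','u','n','t','u'] = true <;>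
            simp [pvBodyB, pvLoopA, pvEquivalences, pvFirstToGroup_eq, hkey, hs,
                  s1, s2, s4, s5, pv_getD_ubuntu, PySem.Dict.get?_mk_cons]
        · by_cases hd : c = 'd'
          · subst hd
            have hkey : PySem.Str.slice d2 none (some 1) = "d" :=
              String.toList_inj.mp (by rw [pv_slice1_toList, ht1]; simp)
            have s1 : PySem.Chars.startswith d2.toList ['e','l'] = false :=
              pv_sw_false_of_head _ _ (by decide) ht1
            have s2 : PySem.Chars.startswith d2.toList ['a','m','z','n'] = false :=
              pv_sw_false_of_head _ _ (by decide) ht1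
            have s3 : PySem.Chars.startswith d2.toList ['u','b','u','n','t','u'] = false :=
              pv_sw_false_of_head _ _ (by decide) ht1
            have s5 : PySem.Chars.startswith d2.toList ['s','u','s','e'] = false :=
              pv_sw_false_of_head _ _ (by decide) ht1
            by_cases hs : PySem.Chars.startswith d2.toList ['d','e','b','i','a','n'] = true <;>
              simp [pvBodyB, pvLoopA, pvEquivalences, pvFirstToGroup_eq, hkey, hs,
                    s1, s2, s3, s5, pv_getD_debian, PySem.Dict.get?_mk_cons]
          · by_cases hss : c = 's'
            · subst hss
              have hkey : PySem.Str.slice d2 none (some 1) = "s" :=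
                String.toList_inj.mp (by rw [pv_slice1_toList, ht1]; simp)
              have s1 : PySem.Chars.startswith d2.toList ['e','l'] = false :=
                pv_sw_false_of_head _ _ (by decide) ht1
              have s2 : PySem.Chars.startswith d2.toList ['a','m','z','n'] = false :=
                pv_sw_false_of_head _ _ (by decide) ht1
              have s3 : PySem.Chars.startswith d2.toList ['u','b','u','n','t','u'] = false :=
                pv_sw_false_of_head _ _ (by decide) ht1
              have s4 : PySem.Chars.startswith d2.toList ['d','e','b','i','a','n'] = false :=
                pv_sw_false_of_head _ _ (by decide) ht1
              by_cases hs : PySem.Chars.startswith d2.toList ['s','u','s','e'] = true <;>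
                simp [pvBodyB, pvLoopA, pvEquivalences, pvFirstToGroup_eq, hkey, hs,
                      s1, s2, s3, s4, pv_getD_suse, PySem.Dict.get?_mk_cons]
            · -- no group name can match d2's first character: every branch is dead
              have hkey : PySem.Str.slice d2 none (some 1) = String.ofList [c] :=
                String.toList_inj.mp (by rw [pv_slice1_toList, ht1]; simp)
              have s1 : PySem.Chars.startswith d2.toList ['e','l'] = false :=
                pv_sw_false_of_head _ _ he ht1
              have s2 : PySem.Chars.startswith d2.toList ['a','m','z','n'] = false :=
                pv_sw_false_of_head _ _ ha ht1
              have s3 : PySem.Chars.startswith d2.toList ['u','b','u','n','t','u'] = false :=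
                pv_sw_false_of_head _ _ hu ht1
              have s4 : PySem.Chars.startswith d2.toList ['d','e','b','i','a','n'] = false :=
                pv_sw_false_of_head _ _ hd ht1
              have s5 : PySem.Chars.startswith d2.toList ['s','u','s','e'] = false :=
                pv_sw_false_of_head _ _ hss ht1
              simp [pvBodyB, pvLoopA, pvEquivalences, pvFirstToGroup_eq, hkey,
                    s1, s2, s3, s4, s5, PySem.Dict.get?_mk_cons, pv_get_nil,
                    pv_key_ne "e" c (by simpa using Ne.symm he),
                    pv_key_ne "a" c (by simpa using Ne.symm ha),
                    pv_key_ne "u" c (by simpa using Ne.symm hu),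
                    pv_key_ne "d" c (by simpa using Ne.symm hd),
                    pv_key_ne "s" c (by simpa using Ne.symm hss)]
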